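-- pv_equiv track=rewrite | github.com/pypi-data/pypi-mirror-401 | packages/xython/xython-4.2.0.tar.gz/xython-4.2.0/src/xython/xy_util.py | switch_l2d_based_on_index
-- ===== SOURCE A (Python) =====
-- def switch_l2d_based_on_index(input_l2d, input_no_list):
-- 	"""
-- 	2차원의 각 1차원자료들의 index번호를 기준으로 앞뒤를 바꾸는 것
-- 	[[1,2,3,4,5], [5,6,7,8,9]] ==> [[3,4,5, 1,2], [7,8,9, 5,6]]
-- 	input_no_list.sort()
-- 	input_no_list.reverse()
--
-- 	:param input_l2d: 2차원 형태의 리스트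
-- 	:param input_no_list:
-- 	:return:
-- 	"""
-- 	for before, after in input_no_list:
-- 		for no in range(len(input_l2d)):
-- 			value1 = input_l2d[no][before]
-- 			value2 = input_l2d[no][after]
-- 			input_l2d[no][before] = value2
-- 			input_l2d[no][after] = value1
-- 	return input_l2d
-- ===== SOURCE B (Python) =====
-- # B: per row, compose all (before, after) swaps into one permutation table, then
-- # rebuild the row in a single mapping pass (in-place via slice assignment, same
-- # mutation/return-identity as A; equivalence claimed for the return value).
-- def switch_l2d_based_on_index(input_l2d, input_no_list):
-- 	for row in input_l2d:
-- 		perm = list(range(len(row)))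
-- 		for before, after in input_no_list:
-- 			perm[before], perm[after] = perm[after], perm[before]
-- 		row[:] = [row[p] for p in perm]
-- 	return input_l2d
-- ===== Notes on version B (the rewrite author's own statement) =====
-- stated objective: alternative
-- what changed: Instead of interleaving per-pair swaps over all rows (pair-outer, row-inner element swaps), B builds per row a permutation table composed from all swap pairs and rebuilds the row in one mapping pass.
import Mathlib
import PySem

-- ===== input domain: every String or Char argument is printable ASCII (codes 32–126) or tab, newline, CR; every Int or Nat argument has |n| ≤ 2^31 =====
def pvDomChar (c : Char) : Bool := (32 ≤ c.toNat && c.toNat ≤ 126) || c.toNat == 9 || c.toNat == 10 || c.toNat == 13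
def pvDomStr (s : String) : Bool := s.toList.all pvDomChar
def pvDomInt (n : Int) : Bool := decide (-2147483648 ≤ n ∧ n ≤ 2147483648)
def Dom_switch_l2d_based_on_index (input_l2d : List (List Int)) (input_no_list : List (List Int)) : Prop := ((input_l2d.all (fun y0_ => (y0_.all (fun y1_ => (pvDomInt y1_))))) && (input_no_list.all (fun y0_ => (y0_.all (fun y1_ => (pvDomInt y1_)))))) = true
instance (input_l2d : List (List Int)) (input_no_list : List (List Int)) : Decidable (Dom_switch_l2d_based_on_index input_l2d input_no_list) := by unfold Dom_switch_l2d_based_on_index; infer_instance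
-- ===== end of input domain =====

-- B replaces A's interleaved per-pair swap passes over all rows by a per-row permutation
-- table composed once from all pairs and applied in a single mapping pass (alternative
-- decomposition, same cost class). Both Pythons mutate the rows of input_l2d in place and
-- return the same object; the equivalence proved here is about the RETURN value.

-- shared helper: the swap both Pythons perform — read both cells first, then write
-- l[b] := old l[a] and l[a] := old l[b] (Python's pairwise assignment order)
def pvSwap (b a : Int) (l : List Int) : List Int :=
  PySem.List.pySetD (PySem.List.pySetD l b (PySem.List.pyGetD l a 0)) a (PySem.List.pyGetD l b 0)

-- ===== PORT A =====
def switch_l2d_based_on_index (input_l2d : List (List Int)) (input_no_list : List (List Int)) : List (List Int) :=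
  input_no_list.foldl (fun acc p =>
    let before := PySem.List.pyGetD p 0 0
    let after := PySem.List.pyGetD p 1 0
    (PySem.List.pyRange 0 (PySem.List.len acc) 1).foldl
      (fun acc2 no => PySem.List.pySetD acc2 no (pvSwap before after (PySem.List.pyGetD acc2 no []))) acc) input_l2d

-- ===== PORT B =====
def switch_l2d_based_on_index_alt (input_l2d : List (List Int)) (input_no_list : List (List Int)) : List (List Int) :=
  input_l2d.map (fun row =>
    let perm := input_no_list.foldl
      (fun pm p => pvSwap (PySem.List.pyGetD p 0 0) (PySem.List.pyGetD p 1 0) pm)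
      (PySem.List.pyRange 0 (PySem.List.len row) 1)
    perm.map (fun i => PySem.List.pyGetD row i 0))

-- ===== PRECONDITION & SPEC =====
-- Pre_ excludes exactly the inputs on which the Python A raises: a pair that is not a
-- 2-element list (ValueError on unpacking) or a swap index out of range for some row
-- (IndexError).
def Pre_switch_l2d_based_on_index (input_l2d : List (List Int)) (input_no_list : List (List Int)) : Prop :=
  ∀ p ∈ input_no_list, p.length = 2 ∧
    ∀ row ∈ input_l2d,
      PySem.Raise.InRange row.length (PySem.List.pyGetD p 0 0) ∧
      PySem.Raise.InRange row.length (PySem.List.pyGetD p 1 0)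
instance (input_l2d : List (List Int)) (input_no_list : List (List Int)) : Decidable (Pre_switch_l2d_based_on_index input_l2d input_no_list) := by unfold Pre_switch_l2d_based_on_index; infer_instance

def pvWitness_switch_l2d_based_on_index : List (List Int) × List (List Int) :=
  ([[1, 2, 3, 4, 5], [5, 6, 7, 8, 9]], [[0, 2], [1, -1]])

def Spec_switch_l2d_based_on_index (input_l2d : List (List Int)) (input_no_list : List (List Int)) (out : List (List Int)) : Prop := out = switch_l2d_based_on_index_alt input_l2d input_no_list
instance (input_l2d : List (List Int)) (input_no_list : List (List Int)) (out : List (List Int)) : Decidable (Spec_switch_l2d_based_on_index input_l2d input_no_list out) := by unfold Spec_switch_l2d_based_on_index; infer_instance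

-- ===== CLAIM (what is proved, stated in full; the proofs are below) =====
def Claim_equal_switch_l2d_based_on_index : Prop := ∀ (input_l2d : List (List Int)) (input_no_list : List (List Int)), Dom_switch_l2d_based_on_index input_l2d input_no_list → Pre_switch_l2d_based_on_index input_l2d input_no_list → Spec_switch_l2d_based_on_index input_l2d input_no_list (switch_l2d_based_on_index input_l2d input_no_list)

-- ===== LEMMAS AND PROOFS =====

-- reading an in-range cell of a mapped list applies the function to the original cell
lemma pvGetD_map_inRange (f : Int → Int) (xs : List Int) (i : Int) (d d' : Int)
    (h : PySem.Raise.InRange xs.length i) :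
    PySem.List.pyGetD (xs.map f) i d' = f (PySem.List.pyGetD xs i d) := by
  unfold PySem.Raise.InRange at h
  obtain ⟨h1, h2⟩ := h
  by_cases h0 : 0 ≤ i
  · rw [PySem.List.pyGetD_eq_getElem _ _ h0 (by simpa using h2),
        PySem.List.pyGetD_eq_getElem _ _ h0 h2]
    simp
  · have hk : 0 < (-i).toNat := by omega
    have hk' : (-i).toNat ≤ xs.length := by omega
    have hi : i = -(((-i).toNat : Nat) : Int) := by omega
    rw [hi, PySem.List.pyGetD_neg_natCast _ _ _ hk (by simpa using hk'),
        PySem.List.pyGetD_neg_natCast _ _ _ hk hk']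
    simp

-- out-of-range writes are no-ops
lemma pvSetD_oob (xs : List Int) (i : Int) (v : Int)
    (h : ¬ PySem.Raise.InRange xs.length i) :
    PySem.List.pySetD xs i v = xs := by
  unfold PySem.Raise.InRange at h
  unfold PySem.List.pySetD PySem.List.pySet? PySem.List.pyIdx?
  split_ifs with hA hB hC <;> simp_all <;> omega

-- a negative in-range write resolves from the end
lemma pvSetD_neg (xs : List Int) (k : Nat) (v : Int) (hk : 0 < k) (hk' : k ≤ xs.length) :
    PySem.List.pySetD xs (-(k : Int)) v = xs.set (xs.length - k) v := by
  simp [PySem.List.pySetD, PySem.List.pySet?, PySem.List.pyIdx?, hk']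
  rw [if_neg (by omega : ¬ (k = 0))]
  simp

-- setting commutes with map (unconditionally: out-of-range writes no-op on both sides)
lemma pvSetD_map (f : Int → Int) (xs : List Int) (i : Int) (v : Int) :
    PySem.List.pySetD (xs.map f) i (f v) = (PySem.List.pySetD xs i v).map f := by
  by_cases h0 : 0 ≤ i
  · have hi : i = ((i.toNat : Nat) : Int) := by omega
    rw [hi, PySem.List.pySetD_natCast, PySem.List.pySetD_natCast]
    exact List.map_set.symm
  · by_cases hr : (-i).toNat ≤ xs.length
    · have hk : 0 < (-i).toNat := by omega
      have hi : i = -(((-i).toNat : Nat) : Int) := by omega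
      rw [hi, pvSetD_neg _ _ _ hk (by simpa using hr), pvSetD_neg _ _ _ hk hr]
      simp [List.map_set]
    · rw [pvSetD_oob _ _ _ (by unfold PySem.Raise.InRange; simp; omega),
          pvSetD_oob _ _ _ (by unfold PySem.Raise.InRange; omega)]

-- the swap commutes with map when both indices are in range
lemma pvSwap_map (f : Int → Int) (perm : List Int) (b a : Int)
    (hb : PySem.Raise.InRange perm.length b) (ha : PySem.Raise.InRange perm.length a) :
    pvSwap b a (perm.map f) = (pvSwap b a perm).map f := by
  unfold pvSwap
  rw [pvGetD_map_inRange f perm a 0 0 ha, pvGetD_map_inRange f perm b 0 0 hb,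
      pvSetD_map f perm b (PySem.List.pyGetD perm a 0),
      pvSetD_map f (PySem.List.pySetD perm b (PySem.List.pyGetD perm a 0)) a (PySem.List.pyGetD perm b 0)]

lemma pvSwap_length (b a : Int) (l : List Int) : (pvSwap b a l).length = l.length := by
  simp [pvSwap, PySem.List.length_pySetD]

-- per row: folding the swaps over the row equals folding them over the permutation
-- table and reading the row through it at the end
lemma pvRowFold (row : List Int) (ps : List (List Int))
    (h : ∀ p ∈ ps, PySem.Raise.InRange row.length (PySem.List.pyGetD p 0 0) ∧
                   PySem.Raise.InRange row.length (PySem.List.pyGetD p 1 0)) :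
    ∀ perm : List Int, perm.length = row.length →
    ps.foldl (fun r p => pvSwap (PySem.List.pyGetD p 0 0) (PySem.List.pyGetD p 1 0) r)
      (perm.map (fun i => PySem.List.pyGetD row i 0))
    = (ps.foldl (fun pm p => pvSwap (PySem.List.pyGetD p 0 0) (PySem.List.pyGetD p 1 0) pm) perm).map
        (fun i => PySem.List.pyGetD row i 0) := by
  induction ps with
  | nil => intro perm _; simp
  | cons p ps ih =>
    intro perm hlen
    obtain ⟨hb, ha⟩ := h p (List.mem_cons_self ..)
    rw [← hlen] at hb ha
    simp only [List.foldl_cons]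
    rw [pvSwap_map _ _ _ _ hb ha]
    exact ih (fun q hq => h q (List.mem_cons_of_mem _ hq)) _ (by rw [pvSwap_length, hlen])

-- A's inner index loop: updating every position through F is mapping F over the list
lemma pvSetFold (F : List Int → List Int) :
    ∀ (rest pre : List (List Int)),
    (PySem.List.pyRange (pre.length : Int) ((pre.length + rest.length : Nat) : Int) 1).foldl
      (fun acc no => PySem.List.pySetD acc no (F (PySem.List.pyGetD acc no []))) (pre ++ rest)
    = pre ++ rest.map F := by
  intro rest
  induction rest with
  | nil => intro pre; simp [PySem.List.pyRange_one_eq_nil]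
  | cons x xs ih =>
    intro pre
    rw [PySem.List.pyRange_one_cons (by simp [List.length_cons])]
    simp only [List.foldl_cons]
    have hget : PySem.List.pyGetD (pre ++ x :: xs) (pre.length : Int) ([] : List Int) = x := by
      simp
    have hset : PySem.List.pySetD (pre ++ x :: xs) (pre.length : Int) (F x) = pre ++ F x :: xs := by
      simp
    rw [hget, hset]
    have hmain := ih (pre ++ [F x])
    have harg1 : ((pre ++ [F x]).length : Int) = (pre.length : Int) + 1 := by simp
    have harg2 : (((pre ++ [F x]).length + xs.length : Nat) : Int)
        = ((pre.length + (x :: xs).length : Nat) : Int) := by simp; omega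
    rw [harg1, harg2] at hmain
    simpa using hmain

-- interchanging the loops: folding "map f_p" over pairs is mapping the per-row fold
lemma pvFoldlMapComm (ps : List (List Int)) :
    ∀ l : List (List Int),
    ps.foldl (fun acc p => acc.map (fun r => pvSwap (PySem.List.pyGetD p 0 0) (PySem.List.pyGetD p 1 0) r)) l
    = l.map (fun r => ps.foldl (fun r p => pvSwap (PySem.List.pyGetD p 0 0) (PySem.List.pyGetD p 1 0) r) r) := by
  induction ps with
  | nil => intro l; simp
  | cons p ps ih => intro l; simp [List.foldl_cons, ih, List.map_map, Function.comp]

-- A's outer fold with the inner loop replaced by its map form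
lemma pvPortA_eq (l2d ps : List (List Int)) :
    switch_l2d_based_on_index l2d ps
    = ps.foldl (fun acc p => acc.map (fun r => pvSwap (PySem.List.pyGetD p 0 0) (PySem.List.pyGetD p 1 0) r)) l2d := by
  unfold switch_l2d_based_on_index
  congr 1
  funext acc p
  have h := pvSetFold (pvSwap (PySem.List.pyGetD p 0 0) (PySem.List.pyGetD p 1 0)) acc []
  simpa using h

-- ===== VERDICT (by name: the statement is the Claim_ definition above) =====
theorem switch_l2d_based_on_index_spec : Claim_equal_switch_l2d_based_on_index := by
  intro l2d ps _hdom hpre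
  unfold Spec_switch_l2d_based_on_index
  rw [pvPortA_eq, pvFoldlMapComm]
  unfold switch_l2d_based_on_index_alt
  apply List.map_congr_left
  intro row hrow
  show List.foldl (fun r p => pvSwap (PySem.List.pyGetD p 0 0) (PySem.List.pyGetD p 1 0) r) row ps
    = List.map (fun i => PySem.List.pyGetD row i 0)
        (List.foldl (fun pm p => pvSwap (PySem.List.pyGetD p 0 0) (PySem.List.pyGetD p 1 0) pm)
          (PySem.List.pyRange 0 (PySem.List.len row) 1) ps)
  have hrow0 : (PySem.List.pyRange 0 (PySem.List.len row) 1).map (fun i => PySem.List.pyGetD row i 0) = row := by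
    simpa using PySem.List.map_pyGetD_pyRange_zero' row 0
  have hperm := pvRowFold row ps
    (fun p hp => (hpre p hp).2 row hrow)
    (PySem.List.pyRange 0 (PySem.List.len row) 1)
    (by simp [PySem.List.length_pyRange_one])
  rw [hrow0] at hperm
  exact hperm
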